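-- pv_equiv track=rewrite | github.com/hankcs/HanLP | hanlp/utils/span_util.py | iobes_tags_to_spans
-- ===== SOURCE A (Python) =====
-- from typing import Dict, List, Tuple, Callable, Set, Optional
--
-- TypedStringSpan = Tuple[str, Tuple[int, int]]
--
-- class InvalidTagSequence(Exception):
--     def __init__(self, tag_sequence=None):
--         super().__init__()
--         self.tag_sequence = tag_sequence
--
--     def __str__(self):
--         return " ".join(self.tag_sequence)
--
-- def iobes_tags_to_spans(
--         tag_sequence: List[str], classes_to_ignore: List[str] = None
-- ) -> List[TypedStringSpan]:
--     """
--     Given a sequence corresponding to BIOUL tags, extracts spans.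
--     Spans are inclusive and can be of zero length, representing a single word span.
--     Ill-formed spans are not allowed and will raise `InvalidTagSequence`.
--     This function works properly when the spans are unlabeled (i.e., your labels are
--     simply "B", "I", "O", "U", and "L").
--
--     # Parameters
--
--     tag_sequence : `List[str]`, required.
--         The tag sequence encoded in BIOUL, e.g. ["B-PER", "L-PER", "O"].
--     classes_to_ignore : `List[str]`, optional (default = `None`).
--         A list of string class labels `excluding` the bio tag
--         which should be ignored when extracting spans.
--
--     # Returns
--
--     spans : `List[TypedStringSpan]`
--         The typed, extracted spans from the sequence, in the format (label, (span_start, span_end)).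
--     """
--     spans = []
--     classes_to_ignore = classes_to_ignore or []
--     index = 0
--     while index < len(tag_sequence):
--         label = tag_sequence[index]
--         if label[0] == "S":
--             spans.append((label.partition("-")[2], (index, index)))
--         elif label[0] == "B":
--             start = index
--             while label[0] != "E":
--                 index += 1
--                 if index >= len(tag_sequence):
--                     raise InvalidTagSequence(tag_sequence)
--                 label = tag_sequence[index]
--                 if not (label[0] == "I" or label[0] == "E"):
--                     raise InvalidTagSequence(tag_sequence)
--             spans.append((label.partition("-")[2], (start, index)))
--         else:
--             if label != "O":
--                 raise InvalidTagSequence(tag_sequence)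
--         index += 1
--     return [span for span in spans if span[0] not in classes_to_ignore]
-- ===== SOURCE B (Python) =====
-- class InvalidTagSequence(Exception):
--     def __init__(self, tag_sequence=None):
--         super().__init__()
--         self.tag_sequence = tag_sequence
--
--     def __str__(self):
--         return " ".join(self.tag_sequence)
--
--
-- def iobes_tags_to_spans(tag_sequence, classes_to_ignore=None):
--     """Flat single loop with an explicit 'open span start' state instead of
--     A's outer-while with a nested inner-while sharing the index."""
--     ignore = classes_to_ignore or []
--     spans = []
--     start = None
--     for index, label in enumerate(tag_sequence):
--         first = label[0]
--         if start is None: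
--             if first == "S":
--                 spans.append((label.partition("-")[2], (index, index)))
--             elif first == "B":
--                 start = index
--             elif label == "O":
--                 pass
--             else:
--                 raise InvalidTagSequence(tag_sequence)
--         else:
--             if first == "I":
--                 pass
--             elif first == "E":
--                 spans.append((label.partition("-")[2], (start, index)))
--                 start = None
--             else:
--                 raise InvalidTagSequence(tag_sequence)
--     if start is not None:
--         raise InvalidTagSequence(tag_sequence)
--     return [s for s in spans if s[0] not in ignore]
-- ===== Notes on version B (the rewrite author's own statement) =====
-- stated objective: simpler
-- what changed: Replaces A's outer while-loop with a nested inner while-loop sharing a mutated index by a single flat loop over enumerate(tag_sequence) that keeps an explicit open-span start variable.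
import Mathlib
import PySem

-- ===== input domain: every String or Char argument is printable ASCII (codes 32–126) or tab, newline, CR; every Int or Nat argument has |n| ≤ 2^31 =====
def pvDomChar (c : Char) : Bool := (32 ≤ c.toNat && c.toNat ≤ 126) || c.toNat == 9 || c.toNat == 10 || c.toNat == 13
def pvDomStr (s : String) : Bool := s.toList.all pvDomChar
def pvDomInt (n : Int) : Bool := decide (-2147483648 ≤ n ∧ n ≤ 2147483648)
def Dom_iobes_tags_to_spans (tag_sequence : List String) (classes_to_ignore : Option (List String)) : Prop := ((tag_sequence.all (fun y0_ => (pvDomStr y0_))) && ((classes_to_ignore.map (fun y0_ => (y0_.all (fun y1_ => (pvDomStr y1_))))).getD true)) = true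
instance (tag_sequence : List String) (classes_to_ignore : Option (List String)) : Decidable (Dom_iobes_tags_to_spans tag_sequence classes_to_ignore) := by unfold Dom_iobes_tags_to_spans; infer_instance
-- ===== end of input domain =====

-- B replaces A's outer while-loop with a nested inner while-loop (shared mutated index)
-- by one flat pass that keeps an explicit open-span start state (objective: simpler, same O(n)).
-- Mutation note: A rebinds its classes_to_ignore parameter locally; no argument is mutated.


-- ===== PORT A =====

-- label[0] as Python: some c, or none = IndexError on the empty string (exact)
def pvHd (s : String) : Option Char := s.toList.head?

-- label.partition("-")[2]: the part after the FIRST '-', "" when there is no '-' (exact hand port)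
def pvPart2Aux : List Char → List Char
  | [] => []
  | '-' :: r => r
  | _ :: r => pvPart2Aux r

def pvPart2 (s : String) : String := String.ofList (pvPart2Aux s.toList)

-- A's inner `while label[0] != "E"` loop; none = the raise paths (IndexError / InvalidTagSequence)
def innerA (ts : List String) (i : Nat) (label : String) : Option (Nat × String) :=
  if pvHd label = some 'E' then some (i, label)
  else if h : i + 1 < ts.length then
    let label' := ts[i+1]
    if pvHd label' = some 'I' ∨ pvHd label' = some 'E' then innerA ts (i+1) label'
    else none
  else none
termination_by ts.length - i
decreasing_by exact Nat.sub_succ_lt_self _ _ (Nat.lt_of_succ_lt h)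

-- needed by outerA's termination: the inner loop only moves the shared index forward
theorem innerA_bounds (ts : List String) (i : Nat) (label : String)
    (hi : i < ts.length) {j : Nat} {e : String}
    (h : innerA ts i label = some (j, e)) : i ≤ j ∧ j < ts.length := by
  fun_induction innerA ts i label with
  | case1 i label hE =>
      simp only [Option.some.injEq, Prod.mk.injEq] at h
      omega
  | case2 i label hE hlt label' hIE ih => have := ih hlt h; omega
  | case3 i label hE hlt label' hIE => cases h
  | case4 i label hE hlt => cases h

-- A's outer `while index < len(tag_sequence)` loop; none = the raise paths
def outerA (ts : List String) (i : Nat) (spans : List (String × Int × Int)) :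
    Option (List (String × Int × Int)) :=
  if h : i < ts.length then
    let label := ts[i]
    if pvHd label = some 'S' then
      outerA ts (i+1) (spans ++ [(pvPart2 label, ((i : Int), (i : Int)))])
    else if pvHd label = some 'B' then
      match hin : innerA ts i label with
      | some (j, e) =>
          have hb := innerA_bounds ts i label h hin
          outerA ts (j+1) (spans ++ [(pvPart2 e, ((i : Int), (j : Int)))])
      | none => none
    else if label = "O" then outerA ts (i+1) spans
    else none
  else some spans
termination_by ts.length - i
decreasing_by
  · exact Nat.sub_succ_lt_self _ _ h
  · exact lt_of_le_of_lt (Nat.sub_le_sub_left (Nat.succ_le_succ hb.1) _) (Nat.sub_succ_lt_self _ _ h)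
  · exact Nat.sub_succ_lt_self _ _ h

def iobes_tags_to_spans (tag_sequence : List String) (classes_to_ignore : Option (List String)) : List (String × (Int × Int)) :=
  let ignore := classes_to_ignore.getD []   -- classes_to_ignore or []
  match outerA tag_sequence 0 [] with
  | some spans => spans.filter (fun sp => ¬ ignore.contains sp.1)
  | none => []  -- InvalidTagSequence / IndexError path: excluded by Pre_

-- ===== PORT B =====

-- one flat pass over the enumerated tags; st = open-span start (none when no B-span is
-- in progress); none = the raise paths
def bGo (d : List String) (i : Nat) (st : Option Nat) (acc : List (String × Int × Int)) :
    Option (List (String × Int × Int)) :=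
  match d, st with
  | [], none => some acc
  | [], some _ => none   -- span still open after the loop
  | t :: rest, none =>
    match pvHd t with
    | some 'S' => bGo rest (i+1) none (acc ++ [(pvPart2 t, ((i : Int), (i : Int)))])
    | some 'B' => bGo rest (i+1) (some i) acc
    | _ => if t = "O" then bGo rest (i+1) none acc else none
  | t :: rest, some s =>
    match pvHd t with
    | some 'I' => bGo rest (i+1) (some s) acc
    | some 'E' => bGo rest (i+1) none (acc ++ [(pvPart2 t, ((s : Int), (i : Int)))])
    | _ => none

def iobes_tags_to_spans_alt (tag_sequence : List String) (classes_to_ignore : Option (List String)) : List (String × (Int × Int)) :=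
  let ignore := classes_to_ignore.getD []
  match bGo tag_sequence 0 none [] with
  | some spans => spans.filter (fun sp => ¬ ignore.contains sp.1)
  | none => []  -- InvalidTagSequence / IndexError path: excluded by Pre_

-- ===== PRECONDITION & SPEC =====

-- Pre_ = the sequence is well-formed IOBES, stated as a closed-form local condition on
-- positions: every tag is "O" or starts with S/B/I/E, an I/E tag is preceded by a B/I tag,
-- and a B/I tag is followed by an I/E tag.  On every other sequence the Python A raises
-- (InvalidTagSequence, or IndexError on an empty tag), so Pre_ excludes nothing A returns on.
def Pre_iobes_tags_to_spans (tag_sequence : List String) (classes_to_ignore : Option (List String)) : Prop :=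
  ∀ i < tag_sequence.length,
    (tag_sequence.getD i "" = "O" ∨ pvHd (tag_sequence.getD i "") = some 'S' ∨
      pvHd (tag_sequence.getD i "") = some 'B' ∨ pvHd (tag_sequence.getD i "") = some 'I' ∨
      pvHd (tag_sequence.getD i "") = some 'E')
    ∧ ((pvHd (tag_sequence.getD i "") = some 'I' ∨ pvHd (tag_sequence.getD i "") = some 'E') →
        1 ≤ i ∧ (pvHd (tag_sequence.getD (i-1) "") = some 'B' ∨ pvHd (tag_sequence.getD (i-1) "") = some 'I'))
    ∧ ((pvHd (tag_sequence.getD i "") = some 'B' ∨ pvHd (tag_sequence.getD i "") = some 'I') →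
        i+1 < tag_sequence.length ∧ (pvHd (tag_sequence.getD (i+1) "") = some 'I' ∨ pvHd (tag_sequence.getD (i+1) "") = some 'E'))

instance (tag_sequence : List String) (classes_to_ignore : Option (List String)) : Decidable (Pre_iobes_tags_to_spans tag_sequence classes_to_ignore) := by unfold Pre_iobes_tags_to_spans; infer_instance

def pvWitness_iobes_tags_to_spans : List String × Option (List String) :=
  (["B-PER", "I-PER", "E-PER", "O", "S-LOC"], some ["LOC"])

def Spec_iobes_tags_to_spans (tag_sequence : List String) (classes_to_ignore : Option (List String)) (out : List (String × (Int × Int))) : Prop := out = iobes_tags_to_spans_alt tag_sequence classes_to_ignore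
instance (tag_sequence : List String) (classes_to_ignore : Option (List String)) (out : List (String × (Int × Int))) : Decidable (Spec_iobes_tags_to_spans tag_sequence classes_to_ignore out) := by unfold Spec_iobes_tags_to_spans; infer_instance

-- ===== CLAIM (what is proved, stated in full; the proofs are below) =====
def Claim_equal_iobes_tags_to_spans : Prop := ∀ (tag_sequence : List String) (classes_to_ignore : Option (List String)), Dom_iobes_tags_to_spans tag_sequence classes_to_ignore → Pre_iobes_tags_to_spans tag_sequence classes_to_ignore → Spec_iobes_tags_to_spans tag_sequence classes_to_ignore (iobes_tags_to_spans tag_sequence classes_to_ignore)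

-- ===== LEMMAS AND PROOFS =====

theorem drop_cons_of_getElem (ts : List String) (i : Nat) (h : i < ts.length) :
    ts.drop i = ts[i] :: ts.drop (i+1) := by
  rw [List.drop_eq_getElem_cons h]

-- A's inner loop corresponds to B running with an open span (s = the recorded start)
theorem inner_bridge (ts : List String) (s : Nat) (acc : List (String × Int × Int))
    (i : Nat) (label : String) (hnE : pvHd label ≠ some 'E') :
    bGo (ts.drop (i+1)) (i+1) (some s) acc =
      match innerA ts i label with
      | some (j, e) => bGo (ts.drop (j+1)) (j+1) none (acc ++ [(pvPart2 e, ((s : Int), (j : Int)))])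
      | none => none := by
  fun_induction innerA ts i label with
  | case1 i label hE => exact absurd hE hnE
  | case2 i label hE hlt label' hIE ih =>
      rw [drop_cons_of_getElem ts (i+1) hlt]
      rcases hIE with hI | hE2
      · have hI' : pvHd ts[i+1] = some 'I' := hI
        simp only [bGo, hI']
        exact ih (by rw [hI]; simp)
      · have hE2' : pvHd ts[i+1] = some 'E' := hE2
        rw [show innerA ts (i+1) label' = some (i+1, label') from by rw [innerA]; simp [hE2]]
        simp only [bGo, hE2']
        rfl
  | case3 i label hE hlt label' hIE =>
      rw [drop_cons_of_getElem ts (i+1) hlt]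
      have hI' : pvHd ts[i+1] ≠ some 'I' := fun hc => hIE (Or.inl hc)
      have hE2' : pvHd ts[i+1] ≠ some 'E' := fun hc => hIE (Or.inr hc)
      show (match pvHd ts[i+1] with
        | some 'I' => bGo (ts.drop (i+1+1)) (i+1+1) (some s) acc
        | some 'E' => bGo (ts.drop (i+1+1)) (i+1+1) none (acc ++ [(pvPart2 ts[i+1], ((s:Int), ((i+1:Nat):Int)))])
        | _ => none) = none
      split <;> simp_all
  | case4 i label hE hlt =>
      rw [List.drop_eq_nil_of_le (by omega : ts.length ≤ i+1)]
      simp [bGo]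

-- the core equivalence: A's nested loops compute exactly B's flat state machine
theorem outer_bridge (ts : List String) (i : Nat) (spans : List (String × Int × Int)) :
    outerA ts i spans = bGo (ts.drop i) i none spans := by
  fun_induction outerA ts i spans with
  | case1 i spans h label hS ih =>
      rw [drop_cons_of_getElem ts i h]
      have hS' : pvHd ts[i] = some 'S' := hS
      simp only [bGo, hS']
      exact ih
  | case2 i spans h label hS hB j e hin hb ih =>
      rw [drop_cons_of_getElem ts i h]
      have hB' : pvHd ts[i] = some 'B' := hB
      simp only [bGo, hB']
      rw [inner_bridge ts i spans i ts[i] (by rw [hB']; simp), hin]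
      exact ih
  | case3 i spans h label hS hB hin =>
      rw [drop_cons_of_getElem ts i h]
      have hB' : pvHd ts[i] = some 'B' := hB
      simp only [bGo, hB']
      rw [inner_bridge ts i spans i ts[i] (by rw [hB']; simp), hin]
  | case4 i spans h label hS hB hO ih =>
      rw [drop_cons_of_getElem ts i h]
      have hO' : ts[i] = "O" := hO
      have hH : pvHd ts[i] = some 'O' := by rw [hO']; rfl
      simp only [bGo, hH]
      simp only [if_pos hO']
      exact ih
  | case5 i spans h label hS hB hO =>
      rw [drop_cons_of_getElem ts i h]
      have hS' : pvHd ts[i] ≠ some 'S' := hS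
      have hB' : pvHd ts[i] ≠ some 'B' := hB
      have hO' : ts[i] ≠ "O" := hO
      show none = (match pvHd ts[i] with
        | some 'S' => bGo (ts.drop (i+1)) (i+1) none (spans ++ [(pvPart2 ts[i], ((i:Int), (i:Int)))])
        | some 'B' => bGo (ts.drop (i+1)) (i+1) (some i) spans
        | _ => if ts[i] = "O" then bGo (ts.drop (i+1)) (i+1) none spans else none)
      split <;> simp_all
  | case6 i spans h =>
      rw [List.drop_eq_nil_of_le (by omega : ts.length ≤ i)]
      simp [bGo]

-- ===== VERDICT (by name: the statement is the Claim_ definition above) =====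
theorem iobes_tags_to_spans_spec : Claim_equal_iobes_tags_to_spans := by
  intro ts c _ _
  unfold Spec_iobes_tags_to_spans iobes_tags_to_spans iobes_tags_to_spans_alt
  have h := outer_bridge ts 0 []
  rw [List.drop_zero] at h
  rw [h]
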